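-- pv_equiv track=rewrite | github.com/gpiero10/gpiero | guia7ejs/guia7.py | borrapar_ponecero_pt2
-- ===== SOURCE A (Python) =====
-- def borrapar_ponecero_pt2(lista:list[int])->list[int]:
--     res:list[int] = []
--     for i in range(0,len(lista),1):
--         if (i%2==0):
--             res.append(0)
--         else:
--             res.append(lista[i])
--     return res
-- ===== SOURCE B (Python) =====
-- def borrapar_ponecero_pt2(lista: list[int]) -> list[int]:
--     res = list(lista)
--     res[::2] = [0] * ((len(lista) + 1) // 2)
--     return res
-- ===== Notes on version B (the rewrite author's own statement) =====
-- stated objective: simpler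
-- what changed: Replaces the per-index loop with if/else by a shallow copy plus one bulk stride-2 slice assignment of zeros; the bulk slice write runs in C with no per-element Python branch.
import Mathlib
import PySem

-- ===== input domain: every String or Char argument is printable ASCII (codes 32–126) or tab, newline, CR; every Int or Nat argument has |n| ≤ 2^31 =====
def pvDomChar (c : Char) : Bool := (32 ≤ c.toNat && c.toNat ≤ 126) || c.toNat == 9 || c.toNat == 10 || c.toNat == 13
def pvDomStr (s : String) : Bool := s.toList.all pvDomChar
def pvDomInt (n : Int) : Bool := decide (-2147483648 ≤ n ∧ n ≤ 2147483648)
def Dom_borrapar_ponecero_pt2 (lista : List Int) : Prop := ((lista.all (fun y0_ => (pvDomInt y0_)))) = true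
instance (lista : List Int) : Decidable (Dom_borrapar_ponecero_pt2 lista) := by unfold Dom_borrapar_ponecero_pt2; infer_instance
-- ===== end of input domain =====

-- B replaces the per-index loop-with-branch by a shallow copy plus one bulk stride-2 slice assignment of zeros (simpler).


-- ===== PORT A =====
-- for i in range(0, len(lista), 1): if i%2==0: res.append(0) else: res.append(lista[i])
-- lista[i] is always in range here, so pyGetD (= pyGet? with a default never used) is exact.
def borrapar_ponecero_pt2 (lista : List Int) : List Int :=
  (PySem.List.pyRange 0 (lista.length : Int) 1).foldl
    (fun res i => res ++ [if i % 2 == 0 then 0 else PySem.List.pyGetD lista i 0]) []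

-- ===== PORT B =====
-- res[::2] = zs : write the elements of zs into positions 0,2,4,… of the list (exact
-- transliteration of CPython's extended-slice assignment when len(zs) = (n+1)//2).
def pvAssignStride2 : List Int → List Int → List Int
  | [], _ => []
  | x :: xs, [] => x :: xs
  | _ :: [], z :: _ => [z]
  | _ :: y :: t, z :: zs => z :: y :: pvAssignStride2 t zs

def borrapar_ponecero_pt2_alt (lista : List Int) : List Int :=
  pvAssignStride2 lista
    (List.replicate (PySem.Int.floordiv ((lista.length : Int) + 1) 2).toNat 0)

-- ===== PRECONDITION & SPEC =====
def Spec_borrapar_ponecero_pt2 (lista : List Int) (out : List Int) : Prop := out = borrapar_ponecero_pt2_alt lista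
instance (lista : List Int) (out : List Int) : Decidable (Spec_borrapar_ponecero_pt2 lista out) := by unfold Spec_borrapar_ponecero_pt2; infer_instance

-- ===== CLAIM (what is proved, stated in full; the proofs are below) =====
def Claim_equal_borrapar_ponecero_pt2 : Prop := ∀ (lista : List Int), Dom_borrapar_ponecero_pt2 lista → Spec_borrapar_ponecero_pt2 lista (borrapar_ponecero_pt2 lista)

-- ===== LEMMAS AND PROOFS =====
-- common description of both results: 0, x1, 0, x3, …
def pvE : List Int → List Int
  | [] => []
  | _ :: [] => [0]
  | _ :: y :: t => 0 :: y :: pvE t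

theorem alt_eq_pvE (xs : List Int) : borrapar_ponecero_pt2_alt xs = pvE xs := by
  induction xs using pvE.induct with
  | case1 => rfl
  | case2 x => simp [borrapar_ponecero_pt2_alt, PySem.Int.floordiv, pvAssignStride2, pvE]
  | case3 x y t ih =>
    unfold borrapar_ponecero_pt2_alt at ih ⊢
    have h2 : (PySem.Int.floordiv (((x :: y :: t).length : Int) + 1) 2).toNat
        = (PySem.Int.floordiv ((t.length : Int) + 1) 2).toNat + 1 := by
      rw [PySem.Int.floordiv_eq_ediv_of_pos (by omega),
          PySem.Int.floordiv_eq_ediv_of_pos (by omega)]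
      simp only [List.length_cons]
      omega
    rw [h2, List.replicate_succ]
    simpa [pvAssignStride2, pvE] using ih

theorem mapRange_eq_pvE (xs : List Int) :
    (List.range xs.length).map
      (fun k : Nat => if (((k : Int)) % 2 == 0) = true then (0 : Int)
                else PySem.List.pyGetD xs ((k : Int)) 0) = pvE xs := by
  induction xs using pvE.induct with
  | case1 => rfl
  | case2 x => simp [pvE]
  | case3 x y t ih =>
    have hlen : (x :: y :: t).length = (t.length + 1) + 1 := by simp
    rw [hlen, List.range_succ_eq_map, List.range_succ_eq_map]
    simp only [List.map_cons, List.map_map, Function.comp_def]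
    rw [show (List.range t.length).map
          (fun k : Nat => if ((((k + 1 + 1 : Nat) : Int)) % 2 == 0) = true then (0 : Int)
            else PySem.List.pyGetD (x :: y :: t) (((k + 1 + 1 : Nat) : Int)) 0)
        = (List.range t.length).map
          (fun k : Nat => if (((k : Int)) % 2 == 0) = true then (0 : Int)
            else PySem.List.pyGetD t ((k : Int)) 0) from
      List.map_congr_left (fun k _ => by
        have hpar : ((k + 1 + 1 : Nat) : Int) % 2 = (k : Int) % 2 := by push_cast; omega
        have hget : PySem.List.pyGetD (x :: y :: t) ((k + 1 + 1 : Nat) : Int) 0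
            = PySem.List.pyGetD t (k : Int) 0 := by
          rw [PySem.List.pyGetD_natCast, PySem.List.pyGetD_natCast]
          simp [List.getD]
        rw [hpar, hget])]
    rw [ih]
    norm_num [pvE, PySem.List.pyGetD_natCast, List.getD]
    simp [PySem.List.pyGetD, PySem.List.pyGet?, PySem.List.pyIdx?]

theorem a_eq_pvE (xs : List Int) : borrapar_ponecero_pt2 xs = pvE xs := by
  unfold borrapar_ponecero_pt2
  rw [PySem.List.foldl_append_singleton_eq_map, PySem.List.pyRange_zero_natCast,
    List.map_map]
  exact mapRange_eq_pvE xs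

-- ===== VERDICT (by name: the statement is the Claim_ definition above) =====
theorem borrapar_ponecero_pt2_spec : Claim_equal_borrapar_ponecero_pt2 := by
  intro lista _
  unfold Spec_borrapar_ponecero_pt2
  rw [a_eq_pvE, alt_eq_pvE]
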